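-- pv_equiv track=rewrite | github.com/Viktor-Bubanja/Pretty-Good-Diff | src/str_diff.py | _convert_diff_to_substrings
-- ===== SOURCE A (Python) =====
-- from itertools import zip_longest
--
-- def _convert_diff_to_substrings(first_str, second_str, diff):
--     first_str_diff = [substring_indexes[0] for substring_indexes in diff]
--     second_str_diff = [substring_indexes[1] for substring_indexes in diff]
--     first_substrings = _calculate_substrings(first_str, first_str_diff)
--     second_substrings = _calculate_substrings(second_str, second_str_diff)
--     if first_substrings[0] == "" and second_substrings[0] == "":
--         first_substrings = first_substrings[1:]
--         second_substrings = second_substrings[1:]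
--     return list(zip_longest(first_substrings, second_substrings, fillvalue=""))
--
-- def _calculate_substrings(string, substring_indexes):
--     substrings = []
--     lowest_index = 0
--     highest_index = len(string) - 1
--     for indexes in substring_indexes:
--         non_matched_substring = string[lowest_index : indexes[0]]
--         substrings.append(non_matched_substring)
--         lowest_index = indexes[-1] + 1
--
--         matched_substring = string[indexes[0] : indexes[-1] + 1]
--         substrings.append(matched_substring)
--     if indexes[-1] < highest_index:
--         substrings.append(string[indexes[-1] + 1 : highest_index + 1])
--     return substrings
-- ===== SOURCE B (Python) =====
-- def _convert_diff_to_substrings(first_str, second_str, diff):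
--     result = []
--     low1 = low2 = 0
--     for idx1, idx2 in diff:
--         a1, b1 = idx1[0], idx1[-1] + 1
--         a2, b2 = idx2[0], idx2[-1] + 1
--         result.append((first_str[low1:a1], second_str[low2:a2]))
--         result.append((first_str[a1:b1], second_str[a2:b2]))
--         low1, low2 = b1, b2
--     last1 = diff[-1][0][-1]
--     last2 = diff[-1][1][-1]
--     has1 = last1 < len(first_str) - 1
--     has2 = last2 < len(second_str) - 1
--     if has1 or has2:
--         result.append((first_str[last1 + 1:] if has1 else "",
--                        second_str[last2 + 1:] if has2 else ""))
--     if result and result[0] == ("", ""):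
--         result = result[1:]
--     return result
-- ===== Notes on version B (the rewrite author's own statement) =====
-- stated objective: simpler
-- what changed: One pass over diff with two cursors builds the (first, second) pairs directly, replacing the twice-called per-string helper, the two intermediate lists and zip_longest; the at-most-one-element tail pair and the leading empty-pair drop are handled explicitly.
import Mathlib
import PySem

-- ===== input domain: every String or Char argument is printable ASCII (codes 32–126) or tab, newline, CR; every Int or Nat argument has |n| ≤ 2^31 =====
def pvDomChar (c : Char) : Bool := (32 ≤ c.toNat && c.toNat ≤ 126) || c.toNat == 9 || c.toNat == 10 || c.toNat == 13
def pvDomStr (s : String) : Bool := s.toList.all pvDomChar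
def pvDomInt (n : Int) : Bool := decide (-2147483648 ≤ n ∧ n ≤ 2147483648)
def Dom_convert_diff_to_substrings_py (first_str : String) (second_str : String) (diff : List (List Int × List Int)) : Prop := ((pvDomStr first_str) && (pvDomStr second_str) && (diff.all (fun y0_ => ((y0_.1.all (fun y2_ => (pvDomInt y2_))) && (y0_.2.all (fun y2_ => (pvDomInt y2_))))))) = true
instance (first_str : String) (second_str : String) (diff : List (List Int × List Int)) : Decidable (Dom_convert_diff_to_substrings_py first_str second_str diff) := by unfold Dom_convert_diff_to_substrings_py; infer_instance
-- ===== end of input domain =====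

-- B replaces the twice-called per-string helper + two lists + zip_longest by one pass over diff
-- with two cursors that builds the (first, second) pairs directly; same cost, simpler shape.

-- shared primitive: the Python slice string[a:b] (both programs slice strings the same way)
def pySliceStr (s : List Char) (a b : Int) : String :=
  String.ofList (PySem.List.slice s (some a) (some b))

-- ===== PORT A =====
-- the for-loop of _calculate_substrings (appends [unmatched, matched] per index list, cursor threaded)
def calcLoopA (s : List Char) (idxs : List (List Int)) (low : Int) : List String :=
  match idxs with
  | [] => []
  | ix :: rest =>
      -- indexes[0] / indexes[-1]: Pre_ guarantees ix ≠ [], so the .getD 0 defaults are unreachable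
      let i0 := (PySem.List.pyGet? ix 0).getD 0
      let il := (PySem.List.pyGet? ix (-1)).getD 0
      pySliceStr s low i0 :: pySliceStr s i0 (il + 1) :: calcLoopA s rest (il + 1)

-- _calculate_substrings; `indexes` after the loop is the last element (NameError on [] : excluded by Pre_)
def calcSubstringsA (s : List Char) (idxs : List (List Int)) : List String :=
  let body := calcLoopA s idxs 0
  let lastIx := idxs.getLast?.getD []
  let il := (PySem.List.pyGet? lastIx (-1)).getD 0
  if il < (s.length : Int) - 1 then body ++ [pySliceStr s (il + 1) (s.length : Int)] else body

-- list(zip_longest(xs, ys, fillvalue="")) (itertools helper, ported by hand; exact)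
def zipLongestStr : List String → List String → List (String × String)
  | [], [] => []
  | x :: xs, [] => (x, "") :: zipLongestStr xs []
  | [], y :: ys => ("", y) :: zipLongestStr [] ys
  | x :: xs, y :: ys => (x, y) :: zipLongestStr xs ys

def convert_diff_to_substrings_py (first_str : String) (second_str : String) (diff : List (List Int × List Int)) : List (String × String) :=
  let first_str_diff := diff.map (fun p => p.1)
  let second_str_diff := diff.map (fun p => p.2)
  let first_substrings := calcSubstringsA first_str.toList first_str_diff
  let second_substrings := calcSubstringsA second_str.toList second_str_diff
  -- [0] raises only on an empty list, i.e. only on diff = [] (outside Pre_): default unreachable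
  if (first_substrings.getD 0 "") = "" ∧ (second_substrings.getD 0 "") = "" then
    zipLongestStr (PySem.List.slice first_substrings (some 1) none) (PySem.List.slice second_substrings (some 1) none)
  else
    zipLongestStr first_substrings second_substrings

-- ===== PORT B =====
-- the single for-loop of B: two cursors, pairs built directly
def loopB (f s : List Char) (d : List (List Int × List Int)) (low1 low2 : Int) : List (String × String) :=
  match d with
  | [] => []
  | (ix1, ix2) :: rest =>
      let a1 := (PySem.List.pyGet? ix1 0).getD 0
      let b1 := (PySem.List.pyGet? ix1 (-1)).getD 0 + 1
      let a2 := (PySem.List.pyGet? ix2 0).getD 0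
      let b2 := (PySem.List.pyGet? ix2 (-1)).getD 0 + 1
      (pySliceStr f low1 a1, pySliceStr s low2 a2)
        :: (pySliceStr f a1 b1, pySliceStr s a2 b2)
        :: loopB f s rest b1 b2

def convert_diff_to_substrings_py_alt (first_str : String) (second_str : String) (diff : List (List Int × List Int)) : List (String × String) :=
  let f := first_str.toList
  let s := second_str.toList
  let body := loopB f s diff 0 0
  -- diff[-1] raises on diff = [] (outside Pre_): default unreachable; idx[-1] likewise needs idx ≠ []
  let lastP := diff.getLast?.getD ([], [])
  let last1 := (PySem.List.pyGet? lastP.1 (-1)).getD 0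
  let last2 := (PySem.List.pyGet? lastP.2 (-1)).getD 0
  let has1 := last1 < (f.length : Int) - 1
  let has2 := last2 < (s.length : Int) - 1
  let result :=
    if has1 ∨ has2 then
      body ++ [((if has1 then String.ofList (PySem.List.slice f (some (last1 + 1)) none) else ""),
                (if has2 then String.ofList (PySem.List.slice s (some (last2 + 1)) none) else ""))]
    else body
  match result with
  | ("", "") :: rest => rest
  | r => r

-- ===== PRECONDITION & SPEC =====
-- Pre_ excludes exactly the inputs where A raises: empty diff (NameError: `indexes` unbound after the
-- loop) and any empty index list inside diff (IndexError on indexes[0]/indexes[-1]).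
def Pre_convert_diff_to_substrings_py (first_str : String) (second_str : String) (diff : List (List Int × List Int)) : Prop :=
  diff ≠ [] ∧ ∀ p ∈ diff, p.1 ≠ [] ∧ p.2 ≠ []
instance (first_str : String) (second_str : String) (diff : List (List Int × List Int)) : Decidable (Pre_convert_diff_to_substrings_py first_str second_str diff) := by unfold Pre_convert_diff_to_substrings_py; infer_instance

def pvWitness_convert_diff_to_substrings_py : String × String × (List (List Int × List Int)) :=
  ("abcdef", "xyzuvw", [([0, 1], [1, 2]), ([3], [4])])

def Spec_convert_diff_to_substrings_py (first_str : String) (second_str : String) (diff : List (List Int × List Int)) (out : List (String × String)) : Prop := out = convert_diff_to_substrings_py_alt first_str second_str diff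
instance (first_str : String) (second_str : String) (diff : List (List Int × List Int)) (out : List (String × String)) : Decidable (Spec_convert_diff_to_substrings_py first_str second_str diff out) := by unfold Spec_convert_diff_to_substrings_py; infer_instance

-- ===== CLAIM (what is proved, stated in full; the proofs are below) =====
def Claim_equal_convert_diff_to_substrings_py : Prop := ∀ (first_str : String) (second_str : String) (diff : List (List Int × List Int)), Dom_convert_diff_to_substrings_py first_str second_str diff → Pre_convert_diff_to_substrings_py first_str second_str diff → Spec_convert_diff_to_substrings_py first_str second_str diff (convert_diff_to_substrings_py first_str second_str diff)

-- ===== LEMMAS AND PROOFS =====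

-- s[a:len(s)] = s[a:]
lemma slice_to_length {α : Type} (xs : List α) (a : Int) :
    PySem.List.slice xs (some a) (some (xs.length : Int)) = PySem.List.slice xs (some a) none := by
  simp [PySem.List.slice, PySem.List.clampIdx]
  split_ifs <;> omega

lemma length_calcLoopA (s : List Char) (idxs : List (List Int)) (low : Int) :
    (calcLoopA s idxs low).length = 2 * idxs.length := by
  induction idxs generalizing low with
  | nil => simp [calcLoopA]
  | cons ix rest ih => simp [calcLoopA, ih]; omega

lemma zipLongestStr_append (xs ys ts us : List String) (h : xs.length = ys.length) :
    zipLongestStr (xs ++ ts) (ys ++ us) = zipLongestStr xs ys ++ zipLongestStr ts us := by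
  induction xs generalizing ys with
  | nil => cases ys with
    | nil => simp [zipLongestStr]
    | cons y ys => simp at h
  | cons x xs ih =>
    cases ys with
    | nil => simp at h
    | cons y ys =>
      simp at h
      simp [zipLongestStr, ih ys h]

-- the fused loop of B is the pairwise zip of A's two loop outputs
lemma zip_calcLoopA (f s : List Char) (d : List (List Int × List Int)) (l1 l2 : Int) :
    zipLongestStr (calcLoopA f (d.map (fun p => p.1)) l1) (calcLoopA s (d.map (fun p => p.2)) l2)
      = loopB f s d l1 l2 := by
  induction d generalizing l1 l2 with
  | nil => simp [calcLoopA, loopB, zipLongestStr]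
  | cons p rest ih =>
    obtain ⟨ix1, ix2⟩ := p
    simp only [List.map_cons, calcLoopA, loopB, zipLongestStr]
    rw [ih]

-- 'if c then body ++ [t] else body' as an append of an optional singleton
lemma if_append_push {α : Type} (c : Prop) [Decidable c] (body : List α) (t : α) :
    (if c then body ++ [t] else body) = body ++ (if c then [t] else []) := by
  split_ifs <;> simp

-- zip_longest of the two at-most-one-element tails is B's optional tail pair
lemma zipLongestStr_opt (c1 c2 : Prop) [Decidable c1] [Decidable c2] (t1 t2 : String) :
    zipLongestStr (if c1 then [t1] else []) (if c2 then [t2] else [])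
      = if c1 ∨ c2 then [((if c1 then t1 else ""), (if c2 then t2 else ""))] else [] := by
  split_ifs <;> simp_all [zipLongestStr]

-- the leading-drop match of B's port, when the head pair is not ("","")
lemma dropLead_neg (p : String × String) (L : List (String × String)) (h : ¬ p = ("", "")) :
    (match p :: L with | ("", "") :: rest => rest | r => r) = p :: L := by
  split
  · rename_i rest heq
    injection heq with h1 h2
    exact absurd h1 h
  · rfl

theorem convert_diff_to_substrings_py_spec : Claim_equal_convert_diff_to_substrings_py := by
  intro first_str second_str diff _hDom hPre
  obtain ⟨hne, hall⟩ := hPre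
  unfold Spec_convert_diff_to_substrings_py
  cases diff with
  | nil => exact absurd rfl hne
  | cons p rest =>
    obtain ⟨ix1, ix2⟩ := p
    cases hq : ((ix1, ix2) :: rest).getLast? with
    | none => simp at hq
    | some q =>
      have hq1 : (ix1 :: List.map (fun p : List Int × List Int => p.1) rest).getLast? = some q.1 := by
        rw [show (ix1 :: List.map (fun p : List Int × List Int => p.1) rest)
              = List.map (fun p : List Int × List Int => p.1) ((ix1, ix2) :: rest) from rfl,
            List.getLast?_map, hq]; rfl
      have hq2 : (ix2 :: List.map (fun p : List Int × List Int => p.2) rest).getLast? = some q.2 := by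
        rw [show (ix2 :: List.map (fun p : List Int × List Int => p.2) rest)
              = List.map (fun p : List Int × List Int => p.2) ((ix1, ix2) :: rest) from rfl,
            List.getLast?_map, hq]; rfl
      simp only [convert_diff_to_substrings_py, convert_diff_to_substrings_py_alt,
        calcSubstringsA, hq, List.map_cons, calcLoopA, loopB, pySliceStr, hq1, hq2,
        Option.getD_some]
      rw [if_append_push, if_append_push, if_append_push, slice_to_length, slice_to_length]
      set il1 := (PySem.List.pyGet? q.1 (-1)).getD 0 with hil1
      set il2 := (PySem.List.pyGet? q.2 (-1)).getD 0 with hil2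
      set f := first_str.toList
      set s := second_str.toList
      set i0 := (PySem.List.pyGet? ix1 0).getD 0
      set j0 := (PySem.List.pyGet? ix2 0).getD 0
      set b1 := (PySem.List.pyGet? ix1 (-1)).getD 0 + 1
      set b2 := (PySem.List.pyGet? ix2 (-1)).getD 0 + 1
      set u1 := String.ofList (PySem.List.slice f (some 0) (some i0)) with hu1
      set u2 := String.ofList (PySem.List.slice s (some 0) (some j0)) with hu2
      set m1 := String.ofList (PySem.List.slice f (some i0) (some b1)) with hm1
      set m2 := String.ofList (PySem.List.slice s (some j0) (some b2)) with hm2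
      set C1 := calcLoopA f (rest.map fun p => p.1) b1 with hC1
      set C2 := calcLoopA s (rest.map fun p => p.2) b2 with hC2
      set T1 := (if il1 < (f.length : Int) - 1 then [String.ofList (PySem.List.slice f (some (il1 + 1)) none)] else []) with hT1
      set T2 := (if il2 < (s.length : Int) - 1 then [String.ofList (PySem.List.slice s (some (il2 + 1)) none)] else []) with hT2
      have hlen : (m1 :: C1).length = (m2 :: C2).length := by
        simp [hC1, hC2, length_calcLoopA]
      have hzipT : zipLongestStr T1 T2
          = if il1 < (f.length : Int) - 1 ∨ il2 < (s.length : Int) - 1 then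
              [((if il1 < (f.length : Int) - 1 then String.ofList (PySem.List.slice f (some (il1 + 1)) none) else ""),
                (if il2 < (s.length : Int) - 1 then String.ofList (PySem.List.slice s (some (il2 + 1)) none) else ""))]
            else [] := by
        rw [hT1, hT2, zipLongestStr_opt]
      by_cases hdrop : u1 = "" ∧ u2 = ""
      · rw [if_pos (by simpa using hdrop)]
        rw [PySem.List.slice_from_one, PySem.List.slice_from_one]
        simp only [List.cons_append, List.tail_cons]
        rw [show m1 :: (C1 ++ T1) = (m1 :: C1) ++ T1 from rfl,
            show m2 :: (C2 ++ T2) = (m2 :: C2) ++ T2 from rfl,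
            zipLongestStr_append _ _ _ _ hlen]
        have : zipLongestStr (m1 :: C1) (m2 :: C2) = (m1, m2) :: loopB f s rest b1 b2 := by
          simp only [zipLongestStr, hC1, hC2, zip_calcLoopA]
        rw [this, hzipT]
        obtain ⟨h1, h2⟩ := hdrop
        rw [h1, h2]
        simp
      · rw [if_neg (by simpa using hdrop)]
        simp only [List.cons_append]
        rw [show u1 :: m1 :: (C1 ++ T1) = u1 :: ((m1 :: C1) ++ T1) from rfl,
            show u2 :: m2 :: (C2 ++ T2) = u2 :: ((m2 :: C2) ++ T2) from rfl,
            show zipLongestStr (u1 :: ((m1 :: C1) ++ T1)) (u2 :: ((m2 :: C2) ++ T2))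
              = (u1, u2) :: zipLongestStr ((m1 :: C1) ++ T1) ((m2 :: C2) ++ T2) by
                cases h1 : (m1 :: C1) ++ T1 <;> cases h2 : (m2 :: C2) ++ T2 <;> simp [zipLongestStr],
            zipLongestStr_append _ _ _ _ hlen]
        have h2 : zipLongestStr (m1 :: C1) (m2 :: C2) = (m1, m2) :: loopB f s rest b1 b2 := by
          simp only [zipLongestStr, hC1, hC2, zip_calcLoopA]
        rw [h2, hzipT, dropLead_neg _ _ (by
          intro hpq
          exact hdrop ⟨congrArg Prod.fst hpq, congrArg Prod.snd hpq⟩)]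
        simp
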